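-- pv_equiv track=rewrite | github.com/WebAssembly/binaryen | test/unit/test_fuzz_preserve.py | parse_params_results
-- ===== SOURCE A (Python) =====
-- def parse_params_results(line):
--     # Find either params or results.
--     def get(what, line):
--         ret = ''
--         pos = 0
--
--         while True:
--             # Find the thing we are looking for.
--             start = line.find(what, pos)
--             if start < 0:
--                 break
--
--             # Find the end paren.
--             parens = 1
--             end = start + 1
--             while parens > 0:
--                 if line[end] == '(':
--                     parens += 1
--                 elif line[end] == ')':
--                     parens -= 1
--                 end += 1
--
--             # Add (separated by a space).
--             if ret:
--                 ret += ' '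
--             ret += line[start:end]
--
--             # Keep looking.
--             pos = end
--
--         return ret
--
--     return get('(param', line), get('(result', line)
-- ===== SOURCE B (Python) =====
-- def parse_params_results(line):
--     # One preprocessing pass builds a parenthesis-matching table (stack pairing);
--     # each per-prefix scan then finds the end paren by table lookup instead of depth counting.
--     match = {}
--     stack = []
--     for i, c in enumerate(line):
--         if c == '(':
--             stack.append(i)
--         elif c == ')':
--             if stack:
--                 match[stack.pop()] = i
--
--     def get(what):
--         parts = []
--         pos = 0
--         while True:
--             start = line.find(what, pos)
--             if start < 0:
--                 break
--             end = match[start] + 1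
--             parts.append(line[start:end])
--             pos = end
--         return ' '.join(parts)
--
--     return get('(param'), get('(result')
-- ===== Notes on version B (the rewrite author's own statement) =====
-- stated objective: alternative
-- what changed: A's per-occurrence inner depth-counting loop is replaced by one preprocessing pass over the line that builds a parenthesis-matching table with a stack; each found '(param'/'(result' occurrence is then closed by a single table lookup, and the pieces are collected in a list joined once instead of string concatenation with a manual separator flag.
-- outside the precondition, e.g. on parse_params_results('(param'): A raises IndexError, B raises KeyError; on parse_params_results('(result'): A raises IndexError, B raises KeyError
import Mathlib
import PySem

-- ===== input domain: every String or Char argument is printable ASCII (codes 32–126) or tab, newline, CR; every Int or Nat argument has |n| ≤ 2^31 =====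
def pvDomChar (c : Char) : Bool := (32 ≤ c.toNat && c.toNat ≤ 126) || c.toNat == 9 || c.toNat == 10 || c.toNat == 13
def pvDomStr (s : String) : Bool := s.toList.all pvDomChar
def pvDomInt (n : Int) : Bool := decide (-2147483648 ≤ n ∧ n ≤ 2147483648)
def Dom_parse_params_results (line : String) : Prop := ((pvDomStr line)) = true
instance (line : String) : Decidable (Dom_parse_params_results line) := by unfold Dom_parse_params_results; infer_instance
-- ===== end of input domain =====

-- B replaces A's per-occurrence depth-counting inner loop by one preprocessing pass that
-- builds a parenthesis-matching table (stack pairing); equal output wherever A returns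
-- (Pre_ excludes exactly the inputs where A raises IndexError; B raises KeyError there).

-- ===== PORT A =====
-- A's inner `while parens > 0` loop; `none` = Python's IndexError on line[end].
def pvFindClose (cs : List Char) (parens : Nat) (e : Nat) : Option Nat :=
  if parens = 0 then some e
  else
    match h : cs[e]? with
    | none => none
    | some c =>
        pvFindClose cs (if c = '(' then parens + 1 else if c = ')' then parens - 1 else parens) (e + 1)
termination_by cs.length - e
decreasing_by
  have : e < cs.length := by
    by_contra hh
    simp [List.getElem?_eq_none (show cs.length ≤ e by omega)] at h
  omega

-- A's outer `while True` loop of `get`; fuel = len+1 suffices since pos strictly increases.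
def pvGetA (cs what : List Char) (fuel pos : Nat) (ret : List Char) : List Char :=
  match fuel with
  | 0 => ret
  | fuel + 1 =>
    let start := PySem.Chars.findFrom cs what (pos : Int) none
    if start < 0 then ret
    else
      match pvFindClose cs 1 (start.toNat + 1) with
      | none => ret   -- Python raises IndexError here (outside Pre_)
      | some e =>
          let ret' := (if ret = [] then ret else ret ++ [' ']) ++
                        PySem.List.slice cs (some start) (some (e : Int))
          pvGetA cs what fuel e ret'

def parse_params_results (line : String) : String × String :=
  let cs := line.toList
  (String.ofList (pvGetA cs "(param".toList (cs.length + 1) 0 []),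
   String.ofList (pvGetA cs "(result".toList (cs.length + 1) 0 []))

-- ===== PORT B =====
-- B's preprocessing pass: stack of open-paren indices, table open ↦ close.
def pvBuild : List Char → Nat → List Nat → PySem.Dict Nat Nat → PySem.Dict Nat Nat
  | [], _, _, t => t
  | c :: rest, k, stack, t =>
    if c = '(' then pvBuild rest (k + 1) (k :: stack) t
    else if c = ')' then
      match stack with
      | [] => pvBuild rest (k + 1) [] t
      | j :: s => pvBuild rest (k + 1) s (t.insert j k)
    else pvBuild rest (k + 1) stack t

-- B's `get`: table lookup instead of depth counting; `none` = Python's KeyError (outside Pre_).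
def pvGetB (cs what : List Char) (table : PySem.Dict Nat Nat) (fuel pos : Nat)
    (parts : List (List Char)) : List (List Char) :=
  match fuel with
  | 0 => parts
  | fuel + 1 =>
    let start := PySem.Chars.findFrom cs what (pos : Int) none
    if start < 0 then parts
    else
      match table.get? start.toNat with
      | none => parts   -- Python raises KeyError here (outside Pre_)
      | some j =>
          pvGetB cs what table fuel (j + 1)
            (parts ++ [PySem.List.slice cs (some start) (some ((j : Int) + 1))])

def parse_params_results_alt (line : String) : String × String :=
  let cs := line.toList
  let table := pvBuild cs 0 [] PySem.Dict.empty
  (String.ofList (PySem.Chars.join [' '] (pvGetB cs "(param".toList table (cs.length + 1) 0 [])),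
   String.ofList (PySem.Chars.join [' '] (pvGetB cs "(result".toList table (cs.length + 1) 0 [])))

-- ===== PRECONDITION & SPEC =====
-- balance of the segment [a, b) : #'(' − #')'
def pvBal (cs : List Char) (a b : Nat) : Int :=
  (((cs.drop a).take (b - a)).count '(' : Int) - (((cs.drop a).take (b - a)).count ')' : Int)

-- Pre_ excludes exactly the inputs on which A raises IndexError: those where some occurrence
-- of '(param' or '(result' starts at an open paren with no matching close paren.
def Pre_parse_params_results (line : String) : Prop :=
  ∀ i < line.toList.length,
    ("(param".toList <+: line.toList.drop i ∨ "(result".toList <+: line.toList.drop i) →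
    ∃ j < line.toList.length, i < j ∧ pvBal line.toList i (j + 1) = 0
instance (line : String) : Decidable (Pre_parse_params_results line) := by
  unfold Pre_parse_params_results; infer_instance

def pvWitness_parse_params_results : String := "(func (param i32) (result (ref null $t)))"

def Spec_parse_params_results (line : String) (out : String × String) : Prop :=
  out = parse_params_results_alt line
instance (line : String) (out : String × String) : Decidable (Spec_parse_params_results line out) := by
  unfold Spec_parse_params_results; infer_instance

-- ===== CLAIM (what is proved, stated in full; the proofs are below) =====
def Claim_equal_parse_params_results : Prop :=
  ∀ (line : String), Dom_parse_params_results line → Pre_parse_params_results line →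
    Spec_parse_params_results line (parse_params_results line)

-- ===== LEMMAS AND PROOFS =====

-- step/recurrence facts about pvFindClose
theorem pvFindClose_zero (cs : List Char) (e : Nat) : pvFindClose cs 0 e = some e := by
  rw [pvFindClose]; simp

theorem pvFindClose_step (cs : List Char) (p e : Nat) (c : Char) (hp : p ≠ 0)
    (h : cs[e]? = some c) :
    pvFindClose cs p e =
      pvFindClose cs (if c = '(' then p + 1 else if c = ')' then p - 1 else p) (e + 1) := by
  rw [pvFindClose]; rw [if_neg hp]
  split <;> simp_all

theorem pvFindClose_none (cs : List Char) (p e : Nat) (hp : p ≠ 0) (h : cs[e]? = none) :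
    pvFindClose cs p e = none := by
  rw [pvFindClose]; rw [if_neg hp]
  split <;> simp_all

theorem pvFindClose_le (cs : List Char) (p e e' : Nat) (h : pvFindClose cs p e = some e') :
    e ≤ e' := by
  fun_induction pvFindClose cs p e generalizing e'
  · simp_all
  · simp_all
  · simp_all
    omega

theorem pvFindClose_le_length (cs : List Char) (p e e' : Nat) (hp : p ≠ 0)
    (h : pvFindClose cs p e = some e') : e' ≤ cs.length := by
  fun_induction pvFindClose cs p e generalizing e'
  · exact absurd rfl hp
  · exact absurd h (by simp)
  · rename_i p e hp2 c hc ih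
    simp only [dite_eq_ite] at ih
    by_cases hz : (if c = '(' then p + 1 else if c = ')' then p - 1 else p) = 0
    · rw [pvFindClose, if_pos hz] at h
      have he : e < cs.length := by
        by_contra hh
        simp [List.getElem?_eq_none (show cs.length ≤ e by omega)] at hc
      injection h with h
      omega
    · exact ih e' hz h

theorem pvBal_succ (cs : List Char) (a b : Nat) (ha : a < cs.length) (hab : a < b) :
    pvBal cs a b = (if cs[a]! = '(' then 1 else if cs[a]! = ')' then -1 else 0)
      + pvBal cs (a + 1) b := by
  have hdrop : cs.drop a = cs[a] :: cs.drop (a + 1) := List.drop_eq_getElem_cons ha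
  have hba : b - a = (b - (a + 1)) + 1 := by omega
  have hbang : cs[a]! = cs[a] := getElem!_pos cs a ha
  unfold pvBal
  rw [hdrop, hba, List.take_succ_cons, List.count_cons, List.count_cons, hbang]
  by_cases h1 : cs[a] = '(' <;> by_cases h2 : cs[a] = ')' <;> simp_all <;> ring

theorem pvBuild_cons (c : Char) (rest : List Char) (k : Nat) (stack : List Nat)
    (t : PySem.Dict Nat Nat) :
    pvBuild (c :: rest) k stack t =
      if c = '(' then pvBuild rest (k + 1) (k :: stack) t
      else if c = ')' then
        (match stack with
         | [] => pvBuild rest (k + 1) [] t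
         | j :: s => pvBuild rest (k + 1) s (t.insert j k))
      else pvBuild rest (k + 1) stack t := rfl

theorem pvBal_self (cs : List Char) (a : Nat) : pvBal cs a a = 0 := by
  simp [pvBal]

-- if the segment starting at e can bring the depth p down to 0 inside the list, the scan succeeds
theorem pvFindClose_isSome (cs : List Char) (p e : Nat)
    (h : ∃ j, e ≤ j ∧ j < cs.length ∧ (p : Int) + pvBal cs e (j + 1) ≤ 0) :
    (pvFindClose cs p e).isSome := by
  obtain ⟨j, hej, hjl, hbal⟩ := h
  induction hd : j - e generalizing e p with
  | zero =>
    by_cases hp : p = 0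
    · subst hp; simp [pvFindClose_zero]
    · have he : e = j := by omega
      subst he
      have hel : e < cs.length := hjl
      have hc : cs[e]? = some cs[e]! := by
        rw [getElem!_pos cs e hel]; exact List.getElem?_eq_getElem hel
      have hb1 : pvBal cs e (e + 1) =
          (if cs[e]! = '(' then 1 else if cs[e]! = ')' then -1 else 0) := by
        rw [pvBal_succ cs e (e + 1) hel (by omega), pvBal_self]; ring
      rw [pvFindClose_step cs p e cs[e]! hp hc]
      rw [hb1] at hbal
      have hpar : cs[e]! = ')' ∧ p = 1 := by
        by_cases h1 : cs[e]! = '('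
        · rw [if_pos h1] at hbal; omega
        · by_cases h2 : cs[e]! = ')'
          · rw [if_neg h1, if_pos h2] at hbal
            exact ⟨h2, by omega⟩
          · rw [if_neg h1, if_neg h2] at hbal; omega
      rw [hpar.2]
      simp [hpar.1, pvFindClose_zero]
  | succ n ih =>
    by_cases hp : p = 0
    · subst hp; simp [pvFindClose_zero]
    · have hel : e < cs.length := by omega
      have hc : cs[e]? = some cs[e]! := by
        rw [getElem!_pos cs e hel]; exact List.getElem?_eq_getElem hel
      have hsplit := pvBal_succ cs e (j + 1) hel (by omega)
      rw [pvFindClose_step cs p e cs[e]! hp hc]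
      apply ih _ (e + 1) (by omega) ?_ (by omega)
      rw [hsplit] at hbal
      by_cases h1 : cs[e]! = '('
      · rw [if_pos h1] at hbal ⊢; push_cast; omega
      · by_cases h2 : cs[e]! = ')'
        · rw [if_neg h1, if_pos h2] at hbal ⊢; omega
        · rw [if_neg h1, if_neg h2] at hbal ⊢; omega

-- invariant-style statement: the stack holds the still-open parens (top first, rank r ↔ depth r+1),
-- the table already pairs every closed paren with A's local scan result
theorem pvBuild_spec (cs : List Char) (n : Nat) :
    ∀ (k : Nat) (stack : List Nat) (t : PySem.Dict Nat Nat),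
      cs.length - k = n →
      (∀ r (hr : r < stack.length), pvFindClose cs 1 (stack[r] + 1) = pvFindClose cs (r + 1) k) →
      (∀ j ∈ stack, cs[j]? = some '(') →
      (∀ j ∈ stack, j < k) →
      stack.Nodup →
      (∀ i, t.get? i =
        if cs[i]? = some '(' ∧ i < k ∧ i ∉ stack then (pvFindClose cs 1 (i + 1)).map (· - 1)
        else none) →
      ∀ i, cs[i]? = some '(' →
        (pvBuild (cs.drop k) k stack t).get? i = (pvFindClose cs 1 (i + 1)).map (· - 1) := by
  induction n with
  | zero =>
    intro k stack t hlen hfind hpar hbound hnd ht i hi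
    have hk : cs.length ≤ k := by omega
    rw [List.drop_eq_nil_of_le hk]
    show t.get? i = _
    have hil : i < cs.length := by
      by_contra hh
      simp [List.getElem?_eq_none (show cs.length ≤ i by omega)] at hi
    by_cases hmem : i ∈ stack
    · obtain ⟨r, hr, hri⟩ := List.getElem_of_mem hmem
      have h1 : pvFindClose cs 1 (i + 1) = pvFindClose cs (r + 1) k := by
        rw [← hri]; exact hfind r hr
      have h2 : pvFindClose cs (r + 1) k = none :=
        pvFindClose_none cs (r + 1) k (by omega) (List.getElem?_eq_none hk)
      rw [ht i, if_neg (by tauto), h1, h2]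
      rfl
    · rw [ht i, if_pos ⟨hi, by omega, hmem⟩]
  | succ n ih =>
    intro k stack t hlen hfind hpar hbound hnd ht i hi
    have hkl : k < cs.length := by omega
    have hk : cs[k]? = some cs[k] := List.getElem?_eq_getElem hkl
    rw [List.drop_eq_getElem_cons hkl, pvBuild_cons]
    by_cases hc1 : cs[k] = '('
    · rw [if_pos hc1]
      refine ih (k + 1) (k :: stack) t (by omega) ?_ ?_ ?_ ?_ ?_ i hi
      · intro r hr
        match r with
        | 0 => rfl
        | r + 1 =>
          have hr' : r < stack.length := by simpa using hr
          simp only [List.getElem_cons_succ]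
          rw [hfind r hr', pvFindClose_step cs (r + 1) k cs[k] (by omega) hk, if_pos hc1]
      · intro j hj
        rcases List.mem_cons.mp hj with h | h
        · subst h; rw [hk, hc1]
        · exact hpar j h
      · intro j hj
        rcases List.mem_cons.mp hj with h | h
        · omega
        · exact Nat.lt_succ_of_lt (hbound j h)
      · exact List.nodup_cons.mpr ⟨fun hmem => absurd (hbound k hmem) (by omega), hnd⟩
      · intro i'
        rw [ht i']
        refine if_congr ?_ rfl rfl
        simp only [List.mem_cons, not_or]
        constructor
        · rintro ⟨h1, h2, h3⟩
          exact ⟨h1, by omega, fun he => by omega, h3⟩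
        · rintro ⟨h1, h2, h3, h4⟩
          exact ⟨h1, by omega, h4⟩
    · rw [if_neg hc1]
      by_cases hc2 : cs[k] = ')'
      · rw [if_pos hc2]
        cases stack with
        | nil =>
          refine ih (k + 1) [] t (by omega) (by intro r hr; simp at hr) (by simp) (by simp)
            List.nodup_nil ?_ i hi
          intro i'
          rw [ht i']
          refine if_congr ?_ rfl rfl
          simp only [List.not_mem_nil, not_false_iff, and_true]
          constructor
          · rintro ⟨h1, h2⟩; exact ⟨h1, by omega⟩
          · rintro ⟨h1, h2⟩
            refine ⟨h1, ?_⟩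
            rcases Nat.lt_succ_iff_lt_or_eq.mp h2 with h | h
            · exact h
            · subst h; rw [hk] at h1; simp [hc2] at h1
        | cons j s =>
          refine ih (k + 1) s (t.insert j k) (by omega) ?_ ?_ ?_ ?_ ?_ i hi
          · intro r hr
            have := hfind (r + 1) (by simpa using Nat.succ_lt_succ hr)
            simp only [List.getElem_cons_succ] at this
            rw [this, pvFindClose_step cs (r + 2) k cs[k] (by omega) hk,
                if_neg (by simp [hc2]), if_pos hc2]
            norm_num
          · exact fun j' hj' => hpar j' (List.mem_cons_of_mem _ hj')
          · exact fun j' hj' => Nat.lt_succ_of_lt (hbound j' (List.mem_cons_of_mem _ hj'))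
          · exact (List.nodup_cons.mp hnd).2
          · intro i'
            rw [PySem.Dict.get?_insert]
            by_cases hij : i' = j
            · subst hij
              rw [if_pos rfl]
              have hcl : pvFindClose cs 1 (i' + 1) = some (k + 1) := by
                have h0 := hfind 0 (by simp)
                simp only [List.getElem_cons_zero] at h0
                rw [h0, pvFindClose_step cs 1 k cs[k] (by omega) hk,
                    if_neg (by simp [hc2]), if_pos hc2]
                exact pvFindClose_zero cs (k + 1)
              rw [if_pos ⟨hpar i' (by simp), by
                    have := hbound i' (by simp); omega,
                    (List.nodup_cons.mp hnd).1⟩, hcl]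
              simp
            · rw [if_neg hij, ht i']
              refine if_congr ?_ rfl rfl
              simp only [List.mem_cons, not_or]
              constructor
              · rintro ⟨h1, h2, h3, h4⟩; exact ⟨h1, by omega, h4⟩
              · rintro ⟨h1, h2, h3⟩
                refine ⟨h1, ?_, hij, h3⟩
                rcases Nat.lt_succ_iff_lt_or_eq.mp h2 with h | h
                · exact h
                · subst h; rw [hk] at h1; simp [hc2] at h1
      · rw [if_neg hc2]
        refine ih (k + 1) stack t (by omega) ?_ hpar
          (fun j hj => Nat.lt_succ_of_lt (hbound j hj)) hnd ?_ i hi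
        · intro r hr
          rw [hfind r hr, pvFindClose_step cs (r + 1) k cs[k] (by omega) hk,
              if_neg hc1, if_neg hc2]
        · intro i'
          rw [ht i']
          refine if_congr ?_ rfl rfl
          constructor
          · rintro ⟨h1, h2, h3⟩; exact ⟨h1, by omega, h3⟩
          · rintro ⟨h1, h2, h3⟩
            refine ⟨h1, ?_, h3⟩
            rcases Nat.lt_succ_iff_lt_or_eq.mp h2 with h | h
            · exact h
            · subst h; rw [hk] at h1; simp [hc1] at h1

-- the global stack pairing agrees with A's local depth scan
theorem pvBuild_lookup (cs : List Char) (i : Nat) (hi : cs[i]? = some '(') :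
    (pvBuild cs 0 [] PySem.Dict.empty).get? i = (pvFindClose cs 1 (i + 1)).map (· - 1) := by
  have h := pvBuild_spec cs cs.length 0 [] PySem.Dict.empty (by omega)
    (by intro r hr; simp at hr) (by simp) (by simp) List.nodup_nil
    (by intro i'; rw [PySem.Dict.get?_empty]; rw [if_neg (by omega)]) i hi
  rwa [List.drop_zero] at h

theorem pvJoin_eq_nil (parts : List (List Char)) (hne : ∀ p ∈ parts, p ≠ []) :
    PySem.Chars.join [' '] parts = [] ↔ parts = [] := by
  match parts with
  | [] => simp [PySem.Chars.join_nil]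
  | [p] =>
    have := hne p (by simp)
    simp [PySem.Chars.join_singleton, this]
  | p :: q :: r => simp [PySem.Chars.join_cons_cons]

-- joining incrementally  vs  collecting parts then joining once
theorem pvJoin_append (parts : List (List Char)) (x : List Char)
    (hne : ∀ p ∈ parts, p ≠ []) :
    PySem.Chars.join [' '] (parts ++ [x]) =
      (if PySem.Chars.join [' '] parts = [] then PySem.Chars.join [' '] parts
       else PySem.Chars.join [' '] parts ++ [' ']) ++ x := by
  induction parts with
  | nil => simp [PySem.Chars.join_nil, PySem.Chars.join_singleton]
  | cons p rest ih =>
    cases rest with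
    | nil =>
      have hp : p ≠ [] := hne p (by simp)
      simp [PySem.Chars.join_singleton, PySem.Chars.join_cons_cons, hp]
    | cons q r =>
      have hne' : ∀ u ∈ q :: r, u ≠ [] := fun u hu => hne u (by simp [hu])
      have h1 : PySem.Chars.join [' '] (q :: r) ≠ [] := by
        rw [ne_eq, pvJoin_eq_nil _ hne']; simp
      have h2 : PySem.Chars.join [' '] (p :: q :: r) ≠ [] := by
        rw [ne_eq, pvJoin_eq_nil _ hne]; simp
      have lhs : PySem.Chars.join [' '] ((p :: q :: r) ++ [x])
          = p ++ [' '] ++ PySem.Chars.join [' '] ((q :: r) ++ [x]) := by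
        simp [PySem.Chars.join_cons_cons]
      rw [lhs, ih hne', if_neg h1, if_neg h2]
      simp [PySem.Chars.join_cons_cons, List.append_assoc]

theorem pvGetA_succ (cs what : List Char) (fuel pos : Nat) (ret : List Char) :
    pvGetA cs what (fuel + 1) pos ret =
      (if PySem.Chars.findFrom cs what (pos : Int) none < 0 then ret
       else match pvFindClose cs 1 ((PySem.Chars.findFrom cs what (pos : Int) none).toNat + 1) with
         | none => ret
         | some e =>
             pvGetA cs what fuel e ((if ret = [] then ret else ret ++ [' ']) ++
               PySem.List.slice cs (some (PySem.Chars.findFrom cs what (pos : Int) none))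
                 (some (e : Int)))) := rfl

theorem pvGetB_succ (cs what : List Char) (table : PySem.Dict Nat Nat) (fuel pos : Nat)
    (parts : List (List Char)) :
    pvGetB cs what table fuel.succ pos parts =
      (if PySem.Chars.findFrom cs what (pos : Int) none < 0 then parts
       else match table.get? (PySem.Chars.findFrom cs what (pos : Int) none).toNat with
         | none => parts
         | some j =>
             pvGetB cs what table fuel (j + 1)
               (parts ++ [PySem.List.slice cs
                 (some (PySem.Chars.findFrom cs what (pos : Int) none)) (some ((j : Int) + 1))])) := rfl

-- the two `get` loops agree step for step
theorem pvGet_eq (cs what : List Char) (hw : what.head? = some '(')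
    (hpre : ∀ i < cs.length, what <+: cs.drop i →
      ∃ j < cs.length, i < j ∧ pvBal cs i (j + 1) = 0)
    (fuel pos : Nat) (parts : List (List Char)) (hne : ∀ p ∈ parts, p ≠ [])
    (hpos : pos ≤ cs.length) :
    pvGetA cs what fuel pos (PySem.Chars.join [' '] parts) =
      PySem.Chars.join [' ']
        (pvGetB cs what (pvBuild cs 0 [] PySem.Dict.empty) fuel pos parts) := by
  induction fuel generalizing pos parts with
  | zero => rfl
  | succ fuel ih =>
    rw [pvGetA_succ, pvGetB_succ]
    by_cases h0 : PySem.Chars.findFrom cs what (pos : Int) none < 0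
    · rw [if_pos h0, if_pos h0]
    · rw [if_neg h0, if_neg h0]
      have hne1 : PySem.Chars.findFrom cs what (pos : Int) none ≠ -1 := by omega
      obtain ⟨hkle, hpref, -⟩ :=
        PySem.Chars.findFrom_natCast_spec cs what pos hpos hne1
      set f := PySem.Chars.findFrom cs what (pos : Int) none with hfdef
      set i := f.toNat with hidef
      obtain ⟨w', hw'⟩ : ∃ w', what = '(' :: w' := by
        cases what with
        | nil => simp at hw
        | cons a w' => exact ⟨w', by simp at hw; rw [hw]⟩
      have hhead : (cs.drop i)[0]? = some '(' := by
        obtain ⟨rest, hr⟩ := hpref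
        rw [← hr, hw']
        rfl
      rw [List.getElem?_drop] at hhead
      have hil : i < cs.length := by
        by_contra hh
        rw [List.getElem?_eq_none (by omega)] at hhead
        exact absurd hhead (by simp)
      have hci : cs[i]? = some '(' := by simpa using hhead
      obtain ⟨j, hjl, hij, hbal⟩ := hpre i hil hpref
      have hbang : cs[i]! = '(' := by
        rw [getElem!_pos cs i hil]
        rw [List.getElem?_eq_getElem hil] at hci
        exact Option.some.inj hci
      have hsome : (pvFindClose cs 1 (i + 1)).isSome := by
        apply pvFindClose_isSome
        refine ⟨j, by omega, hjl, ?_⟩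
        have hstep := pvBal_succ cs i (j + 1) hil (by omega)
        rw [hbang, if_pos rfl] at hstep
        omega
      obtain ⟨e, he⟩ := Option.isSome_iff_exists.mp hsome
      have htab := pvBuild_lookup cs i hci
      rw [he] at htab
      simp only [Option.map_some] at htab
      rw [he, htab]
      have hee : i + 1 ≤ e := pvFindClose_le cs 1 (i + 1) e he
      have heL : e ≤ cs.length := pvFindClose_le_length cs 1 (i + 1) e (by omega) he
      show pvGetA cs what fuel e _ = PySem.Chars.join [' ']
        (pvGetB cs what (pvBuild cs 0 [] PySem.Dict.empty) fuel (e - 1 + 1)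
          (parts ++ [PySem.List.slice cs (some f) (some (((e - 1 : Nat) : Int) + 1))]))
      have he1 : e - 1 + 1 = e := by omega
      have hfi : f = (i : Int) := by
        rw [hidef]; exact (Int.toNat_of_nonneg (by omega)).symm
      have hslice2 : (((e - 1 : Nat) : Int) + 1) = (e : Int) := by omega
      have hslne : PySem.List.slice cs (some f) (some (e : Int)) ≠ [] := by
        rw [hfi, PySem.List.slice_natCast]
        intro hcon
        have := congrArg List.length hcon
        simp [List.length_take, List.length_drop] at this
        omega
      have hne' : ∀ p ∈ parts ++ [PySem.List.slice cs (some f) (some (e : Int))], p ≠ [] := by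
        intro p hp
        rcases List.mem_append.mp hp with h | h
        · exact hne p h
        · rw [List.mem_singleton.mp h]; exact hslne
      rw [he1, hslice2, ← pvJoin_append parts _ hne]
      exact ih e (parts ++ [PySem.List.slice cs (some f) (some (e : Int))]) hne' heL

-- ===== VERDICT (by name: the statement is the Claim_ definition above) =====
theorem parse_params_results_spec : Claim_equal_parse_params_results := by
  intro line _hdom hpre
  have h1 := pvGet_eq line.toList "(param".toList rfl
    (fun i hi hp => hpre i hi (Or.inl hp)) (line.toList.length + 1) 0 [] (by simp) (by omega)
  have h2 := pvGet_eq line.toList "(result".toList rfl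
    (fun i hi hp => hpre i hi (Or.inr hp)) (line.toList.length + 1) 0 [] (by simp) (by omega)
  simp only [PySem.Chars.join_nil] at h1 h2
  show (String.ofList (pvGetA line.toList "(param".toList (line.toList.length + 1) 0 []),
        String.ofList (pvGetA line.toList "(result".toList (line.toList.length + 1) 0 [])) =
       (String.ofList (PySem.Chars.join [' ']
          (pvGetB line.toList "(param".toList (pvBuild line.toList 0 [] PySem.Dict.empty)
            (line.toList.length + 1) 0 [])),
        String.ofList (PySem.Chars.join [' ']
          (pvGetB line.toList "(result".toList (pvBuild line.toList 0 [] PySem.Dict.empty)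
            (line.toList.length + 1) 0 [])))
  rw [h1, h2]
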